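-- pv_equiv track=rewrite | github.com/Meteopresscz/KiKit | kikit/fab/jlcpcb.py | sanitizeArchiveName
-- ===== SOURCE A (Python) =====
-- def sanitizeArchiveName(name: str) -> str:
--     replacement_table = {
--         "eval": "evl",
--         "copy": "cp",
--         "convert": "cvt",
--         "confirm": "cfm",
--         "Copy": "cp",
--     }
--     while True:
--         for old, new in replacement_table.items():
--             if old in name:
--                 name = name.replace(old, new)
--         else:
--             break
--     return name
-- ===== SOURCE B (Python) =====
-- def sanitizeArchiveName(name: str) -> str:
--     # Single left-to-right scan: at each position try the replacement keys in
--     # order; emit the replacement and skip the key, or copy one character.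
--     # (The keys are mutually non-overlapping and no replacement re-creates a
--     # key, so one scan equals the original cascade of str.replace passes.)
--     table = [
--         ("eval", "evl"),
--         ("copy", "cp"),
--         ("convert", "cvt"),
--         ("confirm", "cfm"),
--         ("Copy", "cp"),
--     ]
--     out = []
--     i = 0
--     n = len(name)
--     while i < n:
--         for old, new in table:
--             if name.startswith(old, i):
--                 out.append(new)
--                 i += len(old)
--                 break
--         else:
--             out.append(name[i])
--             i += 1
--     return "".join(out)
-- ===== Notes on version B (the rewrite author's own statement) =====
-- stated objective: alternative
-- what changed: Replaces the cascade of five sequential full-string str.replace passes (inside a while/for-else that always runs once) with a single left-to-right scan that tries the replacement keys at each position and builds the output in one pass.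
import Mathlib
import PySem

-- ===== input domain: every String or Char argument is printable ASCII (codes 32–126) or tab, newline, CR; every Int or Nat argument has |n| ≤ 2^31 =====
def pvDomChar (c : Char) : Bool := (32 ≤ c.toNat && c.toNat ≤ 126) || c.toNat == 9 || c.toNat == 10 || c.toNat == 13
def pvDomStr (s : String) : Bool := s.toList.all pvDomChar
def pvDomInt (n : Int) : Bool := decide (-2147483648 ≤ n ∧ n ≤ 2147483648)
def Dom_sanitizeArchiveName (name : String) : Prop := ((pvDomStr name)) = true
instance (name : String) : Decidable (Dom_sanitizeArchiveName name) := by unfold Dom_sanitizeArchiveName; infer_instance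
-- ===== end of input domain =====

-- B replaces A's five sequential str.replace passes by one left-to-right scan; same result, proved equal on all strings.

-- ===== PORT A =====
-- A's while True / for-else: the for's else clause always runs (no break inside the for),
-- so the while breaks after exactly one pass over the table (dict in insertion order).
def sanitizeArchiveName (name : String) : String :=
  let replacement_table : List (String × String) :=
    [("eval", "evl"), ("copy", "cp"), ("convert", "cvt"), ("confirm", "cfm"), ("Copy", "cp")]
  replacement_table.foldl
    (fun n p => if PySem.Str.isIn p.1 n then PySem.Str.replace n p.1 p.2 else n) name

-- ===== PORT B =====
-- Source B's index i into name is represented by the remaining suffix of the char list;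
-- the for over the table becomes the ordered if-chain of startswith (isPrefixOf) tests.
def scanRepl : List Char → List Char
  | [] => []
  | c :: t =>
    if ['e','v','a','l'].isPrefixOf (c :: t) then 'e'::'v'::'l' :: scanRepl (t.drop 3)
    else if ['c','o','p','y'].isPrefixOf (c :: t) then 'c'::'p' :: scanRepl (t.drop 3)
    else if ['c','o','n','v','e','r','t'].isPrefixOf (c :: t) then 'c'::'v'::'t' :: scanRepl (t.drop 6)
    else if ['c','o','n','f','i','r','m'].isPrefixOf (c :: t) then 'c'::'f'::'m' :: scanRepl (t.drop 6)
    else if ['C','o','p','y'].isPrefixOf (c :: t) then 'c'::'p' :: scanRepl (t.drop 3)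
    else c :: scanRepl t
  termination_by l => l.length
  decreasing_by all_goals (simp [List.length_drop]; try omega)

def sanitizeArchiveName_alt (name : String) : String :=
  String.ofList (scanRepl name.toList)

-- ===== PRECONDITION & SPEC =====
def Spec_sanitizeArchiveName (name : String) (out : String) : Prop := out = sanitizeArchiveName_alt name
instance (name : String) (out : String) : Decidable (Spec_sanitizeArchiveName name out) := by unfold Spec_sanitizeArchiveName; infer_instance

-- ===== CLAIM (what is proved, stated in full; the proofs are below) =====
def Claim_equal_sanitizeArchiveName : Prop := ∀ (name : String), Dom_sanitizeArchiveName name → Spec_sanitizeArchiveName name (sanitizeArchiveName name)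

-- ===== LEMMAS AND PROOFS =====

-- fuel/accumulator normalisation for PySem.Chars.replace.go
theorem go_norm (old new : List Char) (hold : old ≠ []) :
    ∀ (fuel : Nat) (l acc : List Char), l.length ≤ fuel →
      PySem.Chars.replace.go old new fuel l acc
        = acc.reverse ++ PySem.Chars.replace.go old new l.length l [] := by
  intro fuel
  induction fuel using Nat.strong_induction_on with
  | _ fuel ih =>
    intro l acc h
    match fuel, l with
    | 0, l =>
      have : l = [] := List.eq_nil_of_length_eq_zero (Nat.le_zero.mp h)
      subst this
      simp [PySem.Chars.replace.go]
    | f+1, [] => simp [PySem.Chars.replace.go]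
    | f+1, c :: t =>
      have h1 : 1 ≤ old.length := by
        cases old with | nil => exact absurd rfl hold | cons a b => simp
      have ht : t.length ≤ f := by simp at h; omega
      rw [PySem.Chars.replace.go]
      by_cases hp : old.isPrefixOf (c::t) = true
      · simp only [hp, if_pos]
        have hd : (List.drop old.length (c::t)).length ≤ t.length := by
          simp [List.length_drop]; omega
        rw [ih f (by omega) _ _ (le_trans hd ht)]
        have hlen2 : (c::t).length = t.length + 1 := by simp
        rw [hlen2, PySem.Chars.replace.go]
        simp only [hp, if_pos]
        conv_rhs => rw [ih t.length (by omega) _ _ hd]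
        simp
      · rw [if_neg hp]
        rw [ih f (by omega) _ _ ht]
        have hlen2 : (c::t).length = t.length + 1 := by simp
        rw [hlen2, PySem.Chars.replace.go]
        rw [if_neg hp]
        conv_rhs => rw [ih t.length (by omega) t [c] (Nat.le_refl _)]
        simp

theorem replace_nil (old new : List Char) (hold : old ≠ []) :
    PySem.Chars.replace [] old new = [] := by
  rw [PySem.Chars.replace]
  have he : old.isEmpty = false := by simpa using hold
  simp [he, PySem.Chars.replace.go]

theorem replace_cons_no (old new : List Char) (hold : old ≠ []) (c : Char) (t : List Char)
    (h : ¬ old.isPrefixOf (c::t) = true) :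
    PySem.Chars.replace (c::t) old new = c :: PySem.Chars.replace t old new := by
  rw [PySem.Chars.replace, PySem.Chars.replace]
  have he : old.isEmpty = false := by simpa using hold
  simp only [he, Bool.false_eq_true, if_false]
  have hlen : (c::t).length = t.length + 1 := by simp
  rw [hlen, PySem.Chars.replace.go, if_neg h]
  rw [go_norm old new hold t.length t [c] (Nat.le_refl _)]
  simp

theorem replace_cons_yes (old new : List Char) (hold : old ≠ []) (t : List Char) :
    PySem.Chars.replace (old ++ t) old new = new ++ PySem.Chars.replace t old new := by
  rw [PySem.Chars.replace, PySem.Chars.replace]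
  have he : old.isEmpty = false := by simpa using hold
  simp only [he, Bool.false_eq_true, if_false]
  match old, hold with
  | o :: os, _ =>
    rw [List.cons_append]
    have hp : (o::os).isPrefixOf (o :: (os ++ t)) = true := by
      simp [List.isPrefixOf_iff_prefix]
    have hlen : (o :: (os ++ t)).length = (os ++ t).length + 1 := by simp
    rw [hlen, PySem.Chars.replace.go, if_pos hp]
    have hdrop : List.drop (o::os).length (o :: (os ++ t)) = t := by simp
    rw [hdrop]
    rw [go_norm _ new (by simp) _ t _ (by simp)]
    simp

theorem replace_of_not_infix (old new : List Char) (hold : old ≠ []) :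
    ∀ (s : List Char), ¬ old <:+: s → PySem.Chars.replace s old new = s := by
  intro s
  induction s with
  | nil => intro _; exact replace_nil old new hold
  | cons c t ih =>
    intro h
    rw [List.infix_cons_iff] at h
    push Not at h
    rw [replace_cons_no old new hold c t (by
      rw [List.isPrefixOf_iff_prefix]; exact fun hp => h.1 hp)]
    rw [ih h.2]

theorem head_pull (o n : Char) (os ns t : List Char) (d : Char) (x : List Char)
    (hdn : d ≠ n)
    (h : PySem.Chars.replace t (o::os) (n::ns) = d :: x) :
    ∃ t', t = d :: t' ∧ x = PySem.Chars.replace t' (o::os) (n::ns) := by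
  match t with
  | [] => rw [replace_nil _ _ (by simp)] at h; exact absurd h (by simp)
  | c :: t' =>
    by_cases hp : (o::os).isPrefixOf (c::t') = true
    · rw [List.isPrefixOf_iff_prefix] at hp
      obtain ⟨r, hr⟩ := hp
      rw [← hr, replace_cons_yes _ _ (by simp) r, List.cons_append, List.cons.injEq] at h
      exact absurd h.1.symm hdn
    · rw [replace_cons_no _ _ (by simp) c t' hp, List.cons.injEq] at h
      exact ⟨t', by rw [h.1], h.2.symm⟩

theorem prefix_pull (o n : Char) (os ns : List Char) :
    ∀ (ds t : List Char), (∀ d ∈ ds, d ≠ n) →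
      ds <+: PySem.Chars.replace t (o::os) (n::ns) → ds <+: t := by
  intro ds
  induction ds with
  | nil => intro t _ _; exact List.nil_prefix
  | cons d ds ih =>
    intro t hd h
    obtain ⟨u, hu⟩ := h
    have hrep : PySem.Chars.replace t (o::os) (n::ns) = d :: (ds ++ u) := by
      rw [← hu]; simp
    obtain ⟨t', rfl, hx⟩ := head_pull o n os ns t d (ds ++ u)
      (hd d (List.mem_cons_self)) hrep
    have hds : ds <+: PySem.Chars.replace t' (o::os) (n::ns) := ⟨u, hx⟩
    have := ih t' (fun e he => hd e (List.mem_cons_of_mem d he)) hds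
    exact List.cons_prefix_cons.mpr ⟨rfl, this⟩

-- pulling "onvert" back through the eval→evl pass needs one extra case split at its 'e'
theorem conv_pull : ∀ (t : List Char),
    ['o','n','v','e','r','t'] <+: PySem.Chars.replace t ['e','v','a','l'] ['e','v','l'] →
    ['o','n','v','e','r','t'] <+: t := by
  intro t h
  obtain ⟨u, hu⟩ := h
  have h1 : PySem.Chars.replace t ['e','v','a','l'] ['e','v','l']
      = 'o' :: (['n','v','e','r','t'] ++ u) := by rw [← hu]; simp
  obtain ⟨t1, rfl, hx1⟩ := head_pull 'e' 'e' _ _ _ 'o' _ (by decide) h1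
  obtain ⟨t2, rfl, hx2⟩ := head_pull 'e' 'e' _ _ t1 'n' (['v','e','r','t'] ++ u) (by decide)
    (by rw [← hx1]; simp)
  obtain ⟨t3, rfl, hx3⟩ := head_pull 'e' 'e' _ _ t2 'v' (['e','r','t'] ++ u) (by decide)
    (by rw [← hx2]; simp)
  -- now ['e','r','t'] ++ u = replace t3
  match t3, hx3 with
  | [], hx3 => rw [replace_nil _ _ (by simp)] at hx3; exact absurd hx3 (by simp)
  | c :: t4, hx3 =>
    by_cases hp : (['e','v','a','l'] : List Char).isPrefixOf (c::t4) = true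
    · rw [List.isPrefixOf_iff_prefix] at hp
      obtain ⟨r, hr⟩ := hp
      rw [← hr, replace_cons_yes _ _ (by simp) r] at hx3
      simp at hx3
    · rw [replace_cons_no _ _ (by simp) c t4 hp] at hx3
      simp only [List.cons_append, List.nil_append] at hx3
      rw [List.cons.injEq] at hx3
      obtain ⟨he, hx4⟩ := hx3
      subst he
      have hrt : ['r','t'] <+: PySem.Chars.replace t4 ['e','v','a','l'] ['e','v','l'] :=
        ⟨u, by simpa using hx4⟩
      have := prefix_pull 'e' 'e' _ _ ['r','t'] t4 (by intro d hd; fin_cases hd <;> decide) hrt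
      obtain ⟨w, hw⟩ := this
      exact ⟨w, by rw [← hw]; simp⟩

-- the five replacement passes of A, on char lists
def rEval (l : List Char) : List Char := PySem.Chars.replace l ['e','v','a','l'] ['e','v','l']
def rCopy (l : List Char) : List Char := PySem.Chars.replace l ['c','o','p','y'] ['c','p']
def rConv (l : List Char) : List Char := PySem.Chars.replace l ['c','o','n','v','e','r','t'] ['c','v','t']
def rConf (l : List Char) : List Char := PySem.Chars.replace l ['c','o','n','f','i','r','m'] ['c','f','m']
def rCopyC (l : List Char) : List Char := PySem.Chars.replace l ['C','o','p','y'] ['c','p']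
def cascade (l : List Char) : List Char := rCopyC (rConf (rConv (rCopy (rEval l))))

theorem rEval_cons (c : Char) (t : List Char) (h : ¬ (['e','v','a','l'] : List Char).isPrefixOf (c::t) = true) :
    rEval (c::t) = c :: rEval t := replace_cons_no _ _ (by simp) c t h
theorem rCopy_cons (c : Char) (t : List Char) (h : ¬ (['c','o','p','y'] : List Char).isPrefixOf (c::t) = true) :
    rCopy (c::t) = c :: rCopy t := replace_cons_no _ _ (by simp) c t h
theorem rConv_cons (c : Char) (t : List Char) (h : ¬ (['c','o','n','v','e','r','t'] : List Char).isPrefixOf (c::t) = true) :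
    rConv (c::t) = c :: rConv t := replace_cons_no _ _ (by simp) c t h
theorem rConf_cons (c : Char) (t : List Char) (h : ¬ (['c','o','n','f','i','r','m'] : List Char).isPrefixOf (c::t) = true) :
    rConf (c::t) = c :: rConf t := replace_cons_no _ _ (by simp) c t h
theorem rCopyC_cons (c : Char) (t : List Char) (h : ¬ (['C','o','p','y'] : List Char).isPrefixOf (c::t) = true) :
    rCopyC (c::t) = c :: rCopyC t := replace_cons_no _ _ (by simp) c t h

theorem rEval_yes (t : List Char) : rEval (['e','v','a','l'] ++ t) = ['e','v','l'] ++ rEval t :=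
  replace_cons_yes _ _ (by simp) t
theorem rCopy_yes (t : List Char) : rCopy (['c','o','p','y'] ++ t) = ['c','p'] ++ rCopy t :=
  replace_cons_yes _ _ (by simp) t
theorem rConv_yes (t : List Char) : rConv (['c','o','n','v','e','r','t'] ++ t) = ['c','v','t'] ++ rConv t :=
  replace_cons_yes _ _ (by simp) t
theorem rConf_yes (t : List Char) : rConf (['c','o','n','f','i','r','m'] ++ t) = ['c','f','m'] ++ rConf t :=
  replace_cons_yes _ _ (by simp) t
theorem rCopyC_yes (t : List Char) : rCopyC (['C','o','p','y'] ++ t) = ['c','p'] ++ rCopyC t :=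
  replace_cons_yes _ _ (by simp) t

theorem pull_rEval (ds t : List Char) (h : ∀ d ∈ ds, d ≠ 'e') : ds <+: rEval t → ds <+: t :=
  prefix_pull 'e' 'e' _ _ ds t h
theorem pull_rCopy (ds t : List Char) (h : ∀ d ∈ ds, d ≠ 'c') : ds <+: rCopy t → ds <+: t :=
  prefix_pull 'c' 'c' _ _ ds t h
theorem pull_rConv (ds t : List Char) (h : ∀ d ∈ ds, d ≠ 'c') : ds <+: rConv t → ds <+: t :=
  prefix_pull 'c' 'c' _ _ ds t h
theorem pull_rConf (ds t : List Char) (h : ∀ d ∈ ds, d ≠ 'c') : ds <+: rConf t → ds <+: t :=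
  prefix_pull 'c' 'c' _ _ ds t h
theorem pull_conv_rEval (t : List Char) :
    ['o','n','v','e','r','t'] <+: rEval t → ['o','n','v','e','r','t'] <+: t := conv_pull t

theorem cascade_nil : cascade [] = [] := by
  unfold cascade rEval rCopy rConv rConf rCopyC
  rw [replace_nil _ _ (by simp), replace_nil _ _ (by simp), replace_nil _ _ (by simp),
      replace_nil _ _ (by simp), replace_nil _ _ (by simp)]

theorem cascade_eval (r : List Char) :
    cascade (['e','v','a','l'] ++ r) = 'e'::'v'::'l' :: cascade r := by
  unfold cascade
  rw [rEval_yes]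
  rw [show (['e','v','l'] ++ rEval r : List Char) = 'e'::'v'::'l'::(rEval r) from rfl]
  rw [rCopy_cons 'e' _ (by simp [List.isPrefixOf]), rCopy_cons 'v' _ (by simp [List.isPrefixOf]),
      rCopy_cons 'l' _ (by simp [List.isPrefixOf])]
  rw [rConv_cons 'e' _ (by simp [List.isPrefixOf]), rConv_cons 'v' _ (by simp [List.isPrefixOf]),
      rConv_cons 'l' _ (by simp [List.isPrefixOf])]
  rw [rConf_cons 'e' _ (by simp [List.isPrefixOf]), rConf_cons 'v' _ (by simp [List.isPrefixOf]),
      rConf_cons 'l' _ (by simp [List.isPrefixOf])]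
  rw [rCopyC_cons 'e' _ (by simp [List.isPrefixOf]), rCopyC_cons 'v' _ (by simp [List.isPrefixOf]),
      rCopyC_cons 'l' _ (by simp [List.isPrefixOf])]

theorem cascade_copy (r : List Char) :
    cascade (['c','o','p','y'] ++ r) = 'c'::'p' :: cascade r := by
  unfold cascade
  rw [show (['c','o','p','y'] ++ r : List Char) = 'c'::'o'::'p'::'y'::r from rfl]
  rw [rEval_cons 'c' _ (by simp [List.isPrefixOf]), rEval_cons 'o' _ (by simp [List.isPrefixOf]),
      rEval_cons 'p' _ (by simp [List.isPrefixOf]), rEval_cons 'y' _ (by simp [List.isPrefixOf])]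
  rw [show ('c'::'o'::'p'::'y'::(rEval r) : List Char) = ['c','o','p','y'] ++ rEval r from rfl]
  rw [rCopy_yes]
  rw [show (['c','p'] ++ rCopy (rEval r) : List Char) = 'c'::'p'::(rCopy (rEval r)) from rfl]
  rw [rConv_cons 'c' _ (by simp [List.isPrefixOf]), rConv_cons 'p' _ (by simp [List.isPrefixOf])]
  rw [rConf_cons 'c' _ (by simp [List.isPrefixOf]), rConf_cons 'p' _ (by simp [List.isPrefixOf])]
  rw [rCopyC_cons 'c' _ (by simp [List.isPrefixOf]), rCopyC_cons 'p' _ (by simp [List.isPrefixOf])]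

theorem cascade_conv (r : List Char) :
    cascade (['c','o','n','v','e','r','t'] ++ r) = 'c'::'v'::'t' :: cascade r := by
  unfold cascade
  rw [show (['c','o','n','v','e','r','t'] ++ r : List Char) = 'c'::'o'::'n'::'v'::'e'::'r'::'t'::r from rfl]
  rw [rEval_cons 'c' _ (by simp [List.isPrefixOf]), rEval_cons 'o' _ (by simp [List.isPrefixOf]),
      rEval_cons 'n' _ (by simp [List.isPrefixOf]), rEval_cons 'v' _ (by simp [List.isPrefixOf]),
      rEval_cons 'e' _ (by simp [List.isPrefixOf]), rEval_cons 'r' _ (by simp [List.isPrefixOf]),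
      rEval_cons 't' _ (by simp [List.isPrefixOf])]
  rw [rCopy_cons 'c' _ (by simp [List.isPrefixOf]), rCopy_cons 'o' _ (by simp [List.isPrefixOf]),
      rCopy_cons 'n' _ (by simp [List.isPrefixOf]), rCopy_cons 'v' _ (by simp [List.isPrefixOf]),
      rCopy_cons 'e' _ (by simp [List.isPrefixOf]), rCopy_cons 'r' _ (by simp [List.isPrefixOf]),
      rCopy_cons 't' _ (by simp [List.isPrefixOf])]
  rw [show ('c'::'o'::'n'::'v'::'e'::'r'::'t'::(rCopy (rEval r)) : List Char)
        = ['c','o','n','v','e','r','t'] ++ rCopy (rEval r) from rfl]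
  rw [rConv_yes]
  rw [show (['c','v','t'] ++ rConv (rCopy (rEval r)) : List Char) = 'c'::'v'::'t'::(rConv (rCopy (rEval r))) from rfl]
  rw [rConf_cons 'c' _ (by simp [List.isPrefixOf]), rConf_cons 'v' _ (by simp [List.isPrefixOf]),
      rConf_cons 't' _ (by simp [List.isPrefixOf])]
  rw [rCopyC_cons 'c' _ (by simp [List.isPrefixOf]), rCopyC_cons 'v' _ (by simp [List.isPrefixOf]),
      rCopyC_cons 't' _ (by simp [List.isPrefixOf])]

theorem cascade_conf (r : List Char) :
    cascade (['c','o','n','f','i','r','m'] ++ r) = 'c'::'f'::'m' :: cascade r := by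
  unfold cascade
  rw [show (['c','o','n','f','i','r','m'] ++ r : List Char) = 'c'::'o'::'n'::'f'::'i'::'r'::'m'::r from rfl]
  rw [rEval_cons 'c' _ (by simp [List.isPrefixOf]), rEval_cons 'o' _ (by simp [List.isPrefixOf]),
      rEval_cons 'n' _ (by simp [List.isPrefixOf]), rEval_cons 'f' _ (by simp [List.isPrefixOf]),
      rEval_cons 'i' _ (by simp [List.isPrefixOf]), rEval_cons 'r' _ (by simp [List.isPrefixOf]),
      rEval_cons 'm' _ (by simp [List.isPrefixOf])]
  rw [rCopy_cons 'c' _ (by simp [List.isPrefixOf]), rCopy_cons 'o' _ (by simp [List.isPrefixOf]),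
      rCopy_cons 'n' _ (by simp [List.isPrefixOf]), rCopy_cons 'f' _ (by simp [List.isPrefixOf]),
      rCopy_cons 'i' _ (by simp [List.isPrefixOf]), rCopy_cons 'r' _ (by simp [List.isPrefixOf]),
      rCopy_cons 'm' _ (by simp [List.isPrefixOf])]
  rw [rConv_cons 'c' _ (by simp [List.isPrefixOf]), rConv_cons 'o' _ (by simp [List.isPrefixOf]),
      rConv_cons 'n' _ (by simp [List.isPrefixOf]), rConv_cons 'f' _ (by simp [List.isPrefixOf]),
      rConv_cons 'i' _ (by simp [List.isPrefixOf]), rConv_cons 'r' _ (by simp [List.isPrefixOf]),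
      rConv_cons 'm' _ (by simp [List.isPrefixOf])]
  rw [show ('c'::'o'::'n'::'f'::'i'::'r'::'m'::(rConv (rCopy (rEval r))) : List Char)
        = ['c','o','n','f','i','r','m'] ++ rConv (rCopy (rEval r)) from rfl]
  rw [rConf_yes]
  rw [show (['c','f','m'] ++ rConf (rConv (rCopy (rEval r))) : List Char)
        = 'c'::'f'::'m'::(rConf (rConv (rCopy (rEval r)))) from rfl]
  rw [rCopyC_cons 'c' _ (by simp [List.isPrefixOf]), rCopyC_cons 'f' _ (by simp [List.isPrefixOf]),
      rCopyC_cons 'm' _ (by simp [List.isPrefixOf])]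

theorem cascade_copyC (r : List Char) :
    cascade (['C','o','p','y'] ++ r) = 'c'::'p' :: cascade r := by
  unfold cascade
  rw [show (['C','o','p','y'] ++ r : List Char) = 'C'::'o'::'p'::'y'::r from rfl]
  rw [rEval_cons 'C' _ (by simp [List.isPrefixOf]), rEval_cons 'o' _ (by simp [List.isPrefixOf]),
      rEval_cons 'p' _ (by simp [List.isPrefixOf]), rEval_cons 'y' _ (by simp [List.isPrefixOf])]
  rw [rCopy_cons 'C' _ (by simp [List.isPrefixOf]), rCopy_cons 'o' _ (by simp [List.isPrefixOf]),
      rCopy_cons 'p' _ (by simp [List.isPrefixOf]), rCopy_cons 'y' _ (by simp [List.isPrefixOf])]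
  rw [rConv_cons 'C' _ (by simp [List.isPrefixOf]), rConv_cons 'o' _ (by simp [List.isPrefixOf]),
      rConv_cons 'p' _ (by simp [List.isPrefixOf]), rConv_cons 'y' _ (by simp [List.isPrefixOf])]
  rw [rConf_cons 'C' _ (by simp [List.isPrefixOf]), rConf_cons 'o' _ (by simp [List.isPrefixOf]),
      rConf_cons 'p' _ (by simp [List.isPrefixOf]), rConf_cons 'y' _ (by simp [List.isPrefixOf])]
  rw [show ('C'::'o'::'p'::'y'::(rConf (rConv (rCopy (rEval r)))) : List Char)
        = ['C','o','p','y'] ++ rConf (rConv (rCopy (rEval r))) from rfl]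
  rw [rCopyC_yes]
  rfl

theorem cascade_default (c : Char) (t : List Char)
    (h1 : ¬ (['e','v','a','l'] : List Char).isPrefixOf (c::t) = true)
    (h2 : ¬ (['c','o','p','y'] : List Char).isPrefixOf (c::t) = true)
    (h3 : ¬ (['c','o','n','v','e','r','t'] : List Char).isPrefixOf (c::t) = true)
    (h4 : ¬ (['c','o','n','f','i','r','m'] : List Char).isPrefixOf (c::t) = true)
    (h5 : ¬ (['C','o','p','y'] : List Char).isPrefixOf (c::t) = true) :
    cascade (c::t) = c :: cascade t := by
  unfold cascade
  rw [rEval_cons c t h1]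
  have hB : ¬ (['c','o','p','y'] : List Char).isPrefixOf (c :: rEval t) = true := by
    intro hcp
    rw [List.isPrefixOf_iff_prefix, List.cons_prefix_cons] at hcp
    obtain ⟨rfl, hpre⟩ := hcp
    have := pull_rEval ['o','p','y'] t (by intro d hd; fin_cases hd <;> decide) hpre
    exact h2 (by rw [List.isPrefixOf_iff_prefix, List.cons_prefix_cons]; exact ⟨rfl, this⟩)
  rw [rCopy_cons c _ hB]
  have hC : ¬ (['c','o','n','v','e','r','t'] : List Char).isPrefixOf (c :: rCopy (rEval t)) = true := by
    intro hcp
    rw [List.isPrefixOf_iff_prefix, List.cons_prefix_cons] at hcp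
    obtain ⟨rfl, hpre⟩ := hcp
    have s1 := pull_rCopy ['o','n','v','e','r','t'] (rEval t) (by intro d hd; fin_cases hd <;> decide) hpre
    have s2 := pull_conv_rEval t s1
    exact h3 (by rw [List.isPrefixOf_iff_prefix, List.cons_prefix_cons]; exact ⟨rfl, s2⟩)
  rw [rConv_cons c _ hC]
  have hD : ¬ (['c','o','n','f','i','r','m'] : List Char).isPrefixOf (c :: rConv (rCopy (rEval t))) = true := by
    intro hcp
    rw [List.isPrefixOf_iff_prefix, List.cons_prefix_cons] at hcp
    obtain ⟨rfl, hpre⟩ := hcp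
    have s1 := pull_rConv ['o','n','f','i','r','m'] (rCopy (rEval t)) (by intro d hd; fin_cases hd <;> decide) hpre
    have s2 := pull_rCopy ['o','n','f','i','r','m'] (rEval t) (by intro d hd; fin_cases hd <;> decide) s1
    have s3 := pull_rEval ['o','n','f','i','r','m'] t (by intro d hd; fin_cases hd <;> decide) s2
    exact h4 (by rw [List.isPrefixOf_iff_prefix, List.cons_prefix_cons]; exact ⟨rfl, s3⟩)
  rw [rConf_cons c _ hD]
  have hE : ¬ (['C','o','p','y'] : List Char).isPrefixOf (c :: rConf (rConv (rCopy (rEval t)))) = true := by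
    intro hcp
    rw [List.isPrefixOf_iff_prefix, List.cons_prefix_cons] at hcp
    obtain ⟨rfl, hpre⟩ := hcp
    have s1 := pull_rConf ['o','p','y'] (rConv (rCopy (rEval t))) (by intro d hd; fin_cases hd <;> decide) hpre
    have s2 := pull_rConv ['o','p','y'] (rCopy (rEval t)) (by intro d hd; fin_cases hd <;> decide) s1
    have s3 := pull_rCopy ['o','p','y'] (rEval t) (by intro d hd; fin_cases hd <;> decide) s2
    have s4 := pull_rEval ['o','p','y'] t (by intro d hd; fin_cases hd <;> decide) s3
    exact h5 (by rw [List.isPrefixOf_iff_prefix, List.cons_prefix_cons]; exact ⟨rfl, s4⟩)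
  rw [rCopyC_cons c _ hE]

theorem cascade_scan (n : Nat) : ∀ (l : List Char), l.length ≤ n → cascade l = scanRepl l := by
  induction n with
  | zero =>
    intro l h
    have hl : l = [] := List.eq_nil_of_length_eq_zero (Nat.le_zero.mp h)
    subst hl
    rw [cascade_nil, scanRepl]
  | succ n ih =>
    intro l hl
    match l with
    | [] => rw [cascade_nil, scanRepl]
    | c :: t =>
      by_cases h1 : (['e','v','a','l'] : List Char).isPrefixOf (c::t) = true
      · obtain ⟨r, hr⟩ : ∃ r, c::t = ['e','v','a','l'] ++ r := by
          rw [List.isPrefixOf_iff_prefix] at h1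
          obtain ⟨r, hr⟩ := h1; exact ⟨r, hr.symm⟩
        rw [hr, cascade_eval, ih r (by
          have hlen := congrArg List.length hr
          simp at hlen hl; omega)]
        rw [show (['e','v','a','l'] ++ r : List Char) = 'e'::'v'::'a'::'l'::r from rfl]
        rw [scanRepl, if_pos (by simp [List.isPrefixOf])]
        simp
      · by_cases h2 : (['c','o','p','y'] : List Char).isPrefixOf (c::t) = true
        · obtain ⟨r, hr⟩ : ∃ r, c::t = ['c','o','p','y'] ++ r := by
            rw [List.isPrefixOf_iff_prefix] at h2
            obtain ⟨r, hr⟩ := h2; exact ⟨r, hr.symm⟩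
          rw [hr, cascade_copy, ih r (by
          have hlen := congrArg List.length hr
          simp at hlen hl; omega)]
          rw [show (['c','o','p','y'] ++ r : List Char) = 'c'::'o'::'p'::'y'::r from rfl]
          rw [scanRepl, if_neg (by simp [List.isPrefixOf]), if_pos (by simp [List.isPrefixOf])]
          simp
        · by_cases h3 : (['c','o','n','v','e','r','t'] : List Char).isPrefixOf (c::t) = true
          · obtain ⟨r, hr⟩ : ∃ r, c::t = ['c','o','n','v','e','r','t'] ++ r := by
              rw [List.isPrefixOf_iff_prefix] at h3
              obtain ⟨r, hr⟩ := h3; exact ⟨r, hr.symm⟩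
            rw [hr, cascade_conv, ih r (by
          have hlen := congrArg List.length hr
          simp at hlen hl; omega)]
            rw [show (['c','o','n','v','e','r','t'] ++ r : List Char) = 'c'::'o'::'n'::'v'::'e'::'r'::'t'::r from rfl]
            rw [scanRepl, if_neg (by simp [List.isPrefixOf]), if_neg (by simp [List.isPrefixOf]),
                if_pos (by simp [List.isPrefixOf])]
            simp
          · by_cases h4 : (['c','o','n','f','i','r','m'] : List Char).isPrefixOf (c::t) = true
            · obtain ⟨r, hr⟩ : ∃ r, c::t = ['c','o','n','f','i','r','m'] ++ r := by
                rw [List.isPrefixOf_iff_prefix] at h4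
                obtain ⟨r, hr⟩ := h4; exact ⟨r, hr.symm⟩
              rw [hr, cascade_conf, ih r (by
          have hlen := congrArg List.length hr
          simp at hlen hl; omega)]
              rw [show (['c','o','n','f','i','r','m'] ++ r : List Char) = 'c'::'o'::'n'::'f'::'i'::'r'::'m'::r from rfl]
              rw [scanRepl, if_neg (by simp [List.isPrefixOf]), if_neg (by simp [List.isPrefixOf]),
                  if_neg (by simp [List.isPrefixOf]), if_pos (by simp [List.isPrefixOf])]
              simp
            · by_cases h5 : (['C','o','p','y'] : List Char).isPrefixOf (c::t) = true
              · obtain ⟨r, hr⟩ : ∃ r, c::t = ['C','o','p','y'] ++ r := by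
                  rw [List.isPrefixOf_iff_prefix] at h5
                  obtain ⟨r, hr⟩ := h5; exact ⟨r, hr.symm⟩
                rw [hr, cascade_copyC, ih r (by
          have hlen := congrArg List.length hr
          simp at hlen hl; omega)]
                rw [show (['C','o','p','y'] ++ r : List Char) = 'C'::'o'::'p'::'y'::r from rfl]
                rw [scanRepl, if_neg (by simp [List.isPrefixOf]), if_neg (by simp [List.isPrefixOf]),
                    if_neg (by simp [List.isPrefixOf]), if_neg (by simp [List.isPrefixOf]),
                    if_pos (by simp [List.isPrefixOf])]
                simp
              · rw [cascade_default c t h1 h2 h3 h4 h5, ih t (by simp at hl; omega)]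
                rw [scanRepl, if_neg h1, if_neg h2, if_neg h3, if_neg h4, if_neg h5]

theorem str_step (nm old nw : String) (hold : old.toList ≠ []) :
    (if PySem.Str.isIn old nm then PySem.Str.replace nm old nw else nm)
      = String.ofList (PySem.Chars.replace nm.toList old.toList nw.toList) := by
  by_cases hin : PySem.Str.isIn old nm = true
  · rw [if_pos hin]; rfl
  · rw [if_neg hin]
    have hni : ¬ old.toList <:+: nm.toList :=
      (PySem.Chars.isIn_eq_false_iff _ _).mp
        (by simpa [PySem.Str.isIn] using Bool.eq_false_iff.mpr (by simpa using hin))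
    rw [replace_of_not_infix old.toList nw.toList hold nm.toList hni, String.ofList_toList]

theorem portA_eq (name : String) : sanitizeArchiveName name = String.ofList (cascade name.toList) := by
  unfold sanitizeArchiveName
  simp only [List.foldl]
  rw [str_step name "eval" "evl" (by decide)]
  rw [str_step _ "copy" "cp" (by decide)]
  rw [str_step _ "convert" "cvt" (by decide)]
  rw [str_step _ "confirm" "cfm" (by decide)]
  rw [str_step _ "Copy" "cp" (by decide)]
  simp only [String.toList_ofList]
  unfold cascade rEval rCopy rConv rConf rCopyC
  rw [show "eval".toList = ['e','v','a','l'] from by decide,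
      show "evl".toList = ['e','v','l'] from by decide,
      show "copy".toList = ['c','o','p','y'] from by decide,
      show "cp".toList = ['c','p'] from by decide,
      show "convert".toList = ['c','o','n','v','e','r','t'] from by decide,
      show "cvt".toList = ['c','v','t'] from by decide,
      show "confirm".toList = ['c','o','n','f','i','r','m'] from by decide,
      show "cfm".toList = ['c','f','m'] from by decide,
      show "Copy".toList = ['C','o','p','y'] from by decide]

-- ===== VERDICT (by name: the statement is the Claim_ definition above) =====
theorem sanitizeArchiveName_spec : Claim_equal_sanitizeArchiveName := by
  intro name _
  unfold Spec_sanitizeArchiveName sanitizeArchiveName_alt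
  rw [portA_eq, cascade_scan name.toList.length name.toList (le_refl _)]
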